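-- pv_equiv track=rewrite | github.com/miliar/Code_Jam_Webscraper | solutions_python/Problem_207/33.py | get_small_solution
-- ===== SOURCE A (Python) =====
-- def get_small_solution(counts):
--     items = sorted((v, k) for k, v in counts.items())
--     if items[0][0] + items[1][0] < items[2][0]:
--         return None
--
--     seps = ['' for i in range(items[2][0])]
--     for i in range(items[0][0]):
--         seps[i] += items[0][1]
--     for i in range(len(seps) - items[1][0], len(seps)):
--         seps[i] += items[1][1]
--     return ''.join(items[2][1] + sep for sep in seps)
-- ===== SOURCE B (Python) =====
-- def get_small_solution(counts):
--     items = sorted((v, k) for k, v in counts.items())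
--     (a, l0), (b, l1), (L, l2) = items[0], items[1], items[2]
--     if a + b < L:
--         return None
--     return (l2 + l0) * (L - b) + (l2 + l0 + l1) * (a + b - L) + (l2 + l1) * (L - a)
-- ===== Notes on version B (the rewrite author's own statement) =====
-- stated objective: simpler
-- what changed: B keeps the same sorted-items view and guard but replaces A's length-L separator list, its two index-filling loops and the final join by a closed-form concatenation of three repeated blocks (l2+l0)*(L-b) + (l2+l0+l1)*(a+b-L) + (l2+l1)*(L-a).
import Mathlib
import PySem

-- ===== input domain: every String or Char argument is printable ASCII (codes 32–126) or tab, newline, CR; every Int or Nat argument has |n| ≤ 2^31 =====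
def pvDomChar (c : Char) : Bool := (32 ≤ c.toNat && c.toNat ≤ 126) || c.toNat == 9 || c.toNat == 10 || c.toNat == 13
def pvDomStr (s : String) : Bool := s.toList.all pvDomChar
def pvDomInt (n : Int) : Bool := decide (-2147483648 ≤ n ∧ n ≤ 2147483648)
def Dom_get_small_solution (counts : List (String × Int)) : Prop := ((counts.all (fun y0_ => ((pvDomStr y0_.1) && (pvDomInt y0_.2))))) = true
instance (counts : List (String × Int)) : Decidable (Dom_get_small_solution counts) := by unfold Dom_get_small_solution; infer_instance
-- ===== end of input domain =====

-- B replaces A's length-L separator list, two index-filling loops and join by a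
-- closed-form concatenation of three repeated blocks; same sorted view and guard (objective: simpler).


-- ===== PORT A =====
-- 'seps[i] += s' is read-then-set; every loop index satisfies 0 ≤ i < len(seps)
-- (range(a) with a ≤ len, range(len-b, len) with 0 ≤ len-b), so pyGetD/pySetD are exact here.
def get_small_solution (counts : List (String × Int)) : Option String :=
  let items : List (Int × String) :=
    PySem.List.sorted2 (((PySem.Dict.ofList counts).items).map (fun kv => (kv.2, kv.1)))
      (fun t => t.1) (fun t => t.2)
  match items with
  | (a, l0) :: (b, l1) :: (L, l2) :: _ =>
    if a + b < L then none
    else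
      let seps : List String := (PySem.List.pyRange 0 L).map (fun _ => "")
      let seps1 := (PySem.List.pyRange 0 a).foldl
        (fun t i => PySem.List.pySetD t i (PySem.List.pyGetD t i "" ++ l0)) seps
      let seps2 := (PySem.List.pyRange (PySem.List.len seps1 - b) (PySem.List.len seps1)).foldl
        (fun t i => PySem.List.pySetD t i (PySem.List.pyGetD t i "" ++ l1)) seps1
      some (PySem.Str.join "" (seps2.map (fun sep => l2 ++ sep)))
  | _ => none  -- items[0]/[1]/[2] raise IndexError: excluded by Pre_

-- ===== PORT B =====
-- Python's  s * n  on str: the code points repeated n times ('' for n ≤ 0) — exact.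
def pvStrMul (s : String) (n : Int) : String := String.ofList (PySem.List.pyRepeat s.toList n)

def get_small_solution_alt (counts : List (String × Int)) : Option String :=
  let items : List (Int × String) :=
    PySem.List.sorted2 (((PySem.Dict.ofList counts).items).map (fun kv => (kv.2, kv.1)))
      (fun t => t.1) (fun t => t.2)
  match PySem.List.pyGet? items 0, PySem.List.pyGet? items 1, PySem.List.pyGet? items 2 with
  | some (a, l0), some (b, l1), some (L, l2) =>
    if a + b < L then none
    else
      some (pvStrMul (l2 ++ l0) (L - b) ++ pvStrMul (l2 ++ l0 ++ l1) (a + b - L) ++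
            pvStrMul (l2 ++ l1) (L - a))
  | _, _, _ => none  -- items[0]/items[1]/items[2] raise IndexError: excluded by Pre_

-- ===== PRECONDITION & SPEC =====
-- A (and B) raise IndexError when the dict has fewer than 3 distinct keys; nothing else is excluded.
def Pre_get_small_solution (counts : List (String × Int)) : Prop :=
  3 ≤ (PySem.Dict.ofList counts).size
instance (counts : List (String × Int)) : Decidable (Pre_get_small_solution counts) := by
  unfold Pre_get_small_solution; infer_instance

def pvWitness_get_small_solution : (List (String × Int)) := [("a", 2), ("b", 2), ("c", 3)]

def Spec_get_small_solution (counts : List (String × Int)) (out : Option String) : Prop := out = get_small_solution_alt counts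
instance (counts : List (String × Int)) (out : Option String) : Decidable (Spec_get_small_solution counts out) := by unfold Spec_get_small_solution; infer_instance

-- ===== CLAIM (what is proved, stated in full; the proofs are below) =====
def Claim_equal_get_small_solution : Prop := ∀ (counts : List (String × Int)), Dom_get_small_solution counts → Pre_get_small_solution counts → Spec_get_small_solution counts (get_small_solution counts)

-- ===== LEMMAS AND PROOFS =====

-- Python's tuple comparison on (Int, String) is the lexicographic order.
def pvKey (p : Int × String) : Int ×ₗ String := toLex p

theorem pv_sorted2_eq (xs : List (Int × String)) :
    PySem.List.sorted2 xs (fun t => t.1) (fun t => t.2) = PySem.List.sorted xs pvKey := by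
  rw [PySem.List.sorted_eq_foldl_insertBy]
  simp only [PySem.List.sorted2]
  congr 1
  funext acc x
  congr 1
  funext u v
  have : ((u.1 < v.1 ∨ ¬v.1 < u.1 ∧ u.2 < v.2)) ↔ (pvKey u < pvKey v) := by
    simp only [pvKey, Prod.Lex.lt_iff, ofLex_toLex]
    constructor
    · rintro (h | ⟨h1, h2⟩)
      · exact Or.inl h
      · rcases lt_trichotomy u.1 v.1 with h | h | h
        · exact Or.inl h
        · exact Or.inr ⟨h, h2⟩
        · exact absurd h h1
    · rintro (h | ⟨h1, h2⟩)
      · exact Or.inl h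
      · exact Or.inr ⟨by rw [h1]; exact lt_irrefl _, h2⟩
  simp only [← decide_not, ← Bool.decide_and, ← Bool.decide_or]
  exact decide_eq_decide.mpr this

-- the filling loop: setting positions c..c+n-1 of s, appending x to each
theorem pvLoop (x : String) (c : Nat) (s : List String) :
    ∀ (n : Nat), c + n ≤ s.length →
    (PySem.List.pyRange (c : Int) ((c : Int) + (n : Int))).foldl
        (fun t i => PySem.List.pySetD t i (PySem.List.pyGetD t i "" ++ x)) s
      = s.take c ++ ((s.drop c).take n).map (fun v => v ++ x) ++ s.drop (c + n) := by
  intro n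
  induction n with
  | zero =>
    intro _
    simp [PySem.List.pyRange_one_eq_nil (le_refl (c : Int))]
  | succ n ih =>
    intro h
    have h' : c + n ≤ s.length := by omega
    have hidx : c + n < s.length := by omega
    have hrange : (PySem.List.pyRange (c : Int) ((c : Int) + ((n : Int) + 1)))
        = PySem.List.pyRange (c : Int) ((c : Int) + (n : Int)) ++ [(c : Int) + (n : Int)] := by
      have := PySem.List.pyRange_one_succ_right (a := (c : Int)) (b := (c : Int) + (n : Int))
        (by omega)
      rw [← this]; ring_nf
    have hcast : ((n : Int) + 1) = ((n + 1 : Nat) : Int) := by push_cast; ring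
    rw [← hcast, hrange, List.foldl_append, ih h']
    -- one more set at index c+n
    have hci : (c : Int) + (n : Int) = ((c + n : Nat) : Int) := by push_cast; ring
    rw [hci, List.foldl_cons, List.foldl_nil, PySem.List.pySetD_natCast, PySem.List.pyGetD_natCast]
    have hlen1 : (s.take c).length = c := by simp; omega
    have hlen2 : (((s.drop c).take n).map (fun v => v ++ x)).length = n := by
      simp; omega
    have hget : (s.take c ++ ((s.drop c).take n).map (fun v => v ++ x) ++ s.drop (c + n)).getD (c + n) ""
        = s[c + n] := by
      rw [List.getD_eq_getElem?_getD, List.append_assoc,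
        List.getElem?_append_right (by rw [hlen1]; omega), hlen1,
        List.getElem?_append_right (by rw [hlen2]; omega), hlen2]
      have h1 : c + n - c - n = 0 := by omega
      rw [h1, List.getElem?_drop]
      have h2 : c + n + 0 = c + n := by omega
      rw [h2, List.getElem?_eq_getElem hidx]
      rfl
    rw [hget]
    have hdrop : s.drop (c + n) = s[c + n] :: s.drop (c + n + 1) :=
      List.drop_eq_getElem_cons hidx
    rw [List.append_assoc, List.set_append, if_neg (by omega), List.set_append, if_neg (by omega),
      hlen1, hlen2, hdrop]
    have h0 : c + n - c - n = 0 := by omega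
    rw [h0, List.set_cons_zero]
    have htake : (s.drop c).take (n + 1) = (s.drop c).take n ++ [s[c + n]] := by
      rw [List.take_add_one]
      congr 1
      rw [List.getElem?_drop]
      simp [List.getElem?_eq_getElem hidx]
    rw [htake]
    simp [List.map_append]
    omega

theorem pv_join_nil_flatten (xs : List (List Char)) :
    PySem.Chars.join [] xs = xs.flatten := by
  simp only [PySem.Chars.join]
  induction xs with
  | nil => simp [List.intercalate]
  | cons h t ih => cases t <;> simp_all [List.intercalate, List.intersperse]

-- the core string identity: A's loop-built join equals B's three repeated blocks
theorem pv_blocks (a b L : Int) (l0 l1 l2 : String)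
    (hab : a ≤ b) (hbL : b ≤ L) (hg : ¬ a + b < L) :
    (PySem.Str.join ""
      ((((PySem.List.pyRange ((PySem.List.len
            ((PySem.List.pyRange 0 a).foldl
              (fun t i => PySem.List.pySetD t i (PySem.List.pyGetD t i "" ++ l0))
              ((PySem.List.pyRange 0 L).map (fun _ => "")))) - b)
          (PySem.List.len
            ((PySem.List.pyRange 0 a).foldl
              (fun t i => PySem.List.pySetD t i (PySem.List.pyGetD t i "" ++ l0))
              ((PySem.List.pyRange 0 L).map (fun _ => ""))))).foldl
          (fun t i => PySem.List.pySetD t i (PySem.List.pyGetD t i "" ++ l1))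
          ((PySem.List.pyRange 0 a).foldl
            (fun t i => PySem.List.pySetD t i (PySem.List.pyGetD t i "" ++ l0))
            ((PySem.List.pyRange 0 L).map (fun _ => ""))))).map (fun sep => l2 ++ sep)))
    = pvStrMul (l2 ++ l0) (L - b) ++ pvStrMul (l2 ++ l0 ++ l1) (a + b - L) ++
      pvStrMul (l2 ++ l1) (L - a) := by
  have h0a : 0 ≤ a := by omega
  have h0b : 0 ≤ b := by omega
  have h0L : 0 ≤ L := by omega
  have haA : a = (a.toNat : Int) := (Int.toNat_of_nonneg h0a).symm
  have hbB : b = (b.toNat : Int) := (Int.toNat_of_nonneg h0b).symm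
  have hLLn : L = (L.toNat : Int) := (Int.toNat_of_nonneg h0L).symm
  have hs0 : (PySem.List.pyRange 0 L).map (fun _ => ("" : String))
      = List.replicate L.toNat "" := by
    rw [PySem.List.pyRange_one, List.map_map]
    have hc : ((fun _ => ("" : String)) ∘ fun k : Nat => 0 + (k : Int)) = fun _ => ("" : String) := rfl
    rw [hc, List.map_const']
    simp
  rw [hs0]
  have e1 : PySem.List.pyRange 0 a
      = PySem.List.pyRange ((0 : Nat) : Int) (((0 : Nat) : Int) + (a.toNat : Int)) := by
    congr 1 <;> omega
  rw [e1, pvLoop l0 0 (List.replicate L.toNat "") a.toNat (by simp; omega)]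
  simp only [List.nil_append, List.take_replicate,
    List.drop_replicate, List.map_replicate, Nat.zero_min, Nat.sub_zero, Nat.zero_add,
    List.replicate_zero]
  have hmin : min a.toNat L.toNat = a.toNat := by omega
  rw [hmin]
  have e2 : PySem.List.pyRange
      (PySem.List.len (List.replicate a.toNat ("" ++ l0) ++ List.replicate (L.toNat - a.toNat) "") - b)
      (PySem.List.len (List.replicate a.toNat ("" ++ l0) ++ List.replicate (L.toNat - a.toNat) ""))
      = PySem.List.pyRange ((L.toNat - b.toNat : Nat) : Int)
          (((L.toNat - b.toNat : Nat) : Int) + (b.toNat : Int)) := by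
    have hl : PySem.List.len
        (List.replicate a.toNat ("" ++ l0) ++ List.replicate (L.toNat - a.toNat) "")
        = ((L.toNat : Nat) : Int) := by
      simp
      omega
    rw [hl]
    congr 1 <;> omega
  rw [e2, pvLoop l1 (L.toNat - b.toNat) _ b.toNat (by simp; omega)]
  have hT1 : (List.replicate a.toNat ("" ++ l0) ++ List.replicate (L.toNat - a.toNat) "").take
        (L.toNat - b.toNat) = List.replicate (L.toNat - b.toNat) ("" ++ l0) := by
    rw [List.take_append, List.length_replicate, List.take_replicate,
      List.take_replicate]
    have h1 : min (L.toNat - b.toNat) a.toNat = L.toNat - b.toNat := by omega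
    have h2 : L.toNat - b.toNat - a.toNat = 0 := by omega
    rw [h1, h2]
    simp
  have hT2 : (((List.replicate a.toNat ("" ++ l0) ++ List.replicate (L.toNat - a.toNat) "").drop
        (L.toNat - b.toNat)).take b.toNat).map (fun v => v ++ l1)
      = List.replicate (a.toNat - (L.toNat - b.toNat)) ("" ++ l0 ++ l1) ++
        List.replicate (L.toNat - a.toNat) ("" ++ l1) := by
    rw [List.drop_append, List.length_replicate, List.drop_replicate,
      List.drop_replicate]
    have h1 : L.toNat - b.toNat - a.toNat = 0 := by omega
    rw [h1, Nat.sub_zero]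
    rw [List.take_append, List.length_replicate, List.take_replicate,
      List.take_replicate]
    have h2 : min b.toNat (a.toNat - (L.toNat - b.toNat)) = a.toNat - (L.toNat - b.toNat) := by
      omega
    have h3 : min (b.toNat - (a.toNat - (L.toNat - b.toNat))) (L.toNat - a.toNat)
        = L.toNat - a.toNat := by omega
    rw [h2, h3, List.map_append, List.map_replicate, List.map_replicate]
  have hT3 : (List.replicate a.toNat ("" ++ l0) ++ List.replicate (L.toNat - a.toNat) "").drop
        (L.toNat - b.toNat + b.toNat) = [] := by
    rw [List.drop_append, List.length_replicate, List.drop_replicate,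
      List.drop_replicate]
    have h1 : a.toNat - (L.toNat - b.toNat + b.toNat) = 0 := by omega
    have h2 : L.toNat - a.toNat - (L.toNat - b.toNat + b.toNat - a.toNat) = 0 := by omega
    rw [h1, h2]
    simp
  rw [hT1, hT2, hT3, List.append_nil]
  rw [← String.toList_inj]
  have hr1 : (L - b).toNat = L.toNat - b.toNat := by omega
  have hr2 : (a + b - L).toNat = a.toNat - (L.toNat - b.toNat) := by omega
  have hr3 : (L - a).toNat = L.toNat - a.toNat := by omega
  simp [PySem.Str.toList_join, pv_join_nil_flatten, pvStrMul, PySem.List.pyRepeat,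
    List.map_append, List.map_replicate, List.flatten_append, String.toList_append,
    String.toList_ofList, hr1, hr2, hr3]

-- ===== VERDICT (by name: the statement is the Claim_ definition above) =====
theorem get_small_solution_spec : Claim_equal_get_small_solution := by
  intro counts _hdom hpre
  unfold Spec_get_small_solution get_small_solution get_small_solution_alt
  rw [pv_sorted2_eq]
  set xs := ((PySem.Dict.ofList counts).items).map (fun kv : String × Int => (kv.2, kv.1)) with hxs
  have hpair := PySem.List.sorted_pairwise xs pvKey
  have hlen : 3 ≤ (PySem.List.sorted xs pvKey).length := by
    rw [(PySem.List.sorted_perm xs pvKey false).length_eq, hxs, List.length_map]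
    exact hpre
  rcases hM : PySem.List.sorted xs pvKey with _ | ⟨⟨a, l0⟩, _ | ⟨⟨b, l1⟩, _ | ⟨⟨L, l2⟩, rest⟩⟩⟩ <;>
    rw [hM] at hlen hpair <;> simp at hlen
  have hab : a ≤ b := by
    have := (List.pairwise_cons.mp hpair).1 (b, l1) (by simp)
    rcases Prod.Lex.le_iff.mp this with h | ⟨h, _⟩
    · exact le_of_lt h
    · exact le_of_eq h
  have hbL : b ≤ L := by
    have := (List.pairwise_cons.mp (List.pairwise_cons.mp hpair).2).1 (L, l2) (by simp)
    rcases Prod.Lex.le_iff.mp this with h | ⟨h, _⟩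
    · exact le_of_lt h
    · exact le_of_eq h
  have hg0 : PySem.List.pyGet? ((a, l0) :: (b, l1) :: (L, l2) :: rest) 0 = some (a, l0) := by simp [pysem]
  have hg1 : PySem.List.pyGet? ((a, l0) :: (b, l1) :: (L, l2) :: rest) 1 = some (b, l1) := by simp [pysem]
  have hg2 : PySem.List.pyGet? ((a, l0) :: (b, l1) :: (L, l2) :: rest) 2 = some (L, l2) := by simp [pysem]
  dsimp only
  rw [hg0, hg1, hg2]
  by_cases hg : a + b < L
  · simp [hg]
  · simp only [if_neg hg]
    exact congrArg some (pv_blocks a b L l0 l1 l2 hab hbL hg)
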